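-- pv_equiv track=rewrite | github.com/vishalpmittal/practice-fun | funNLearn/src/main/java/dsAlgo/recursive/attendance_detension.py | is_detention
-- ===== SOURCE A (Python) =====
-- def is_detention(AR: str) -> bool:
--     ab_count = 0
--     lt_count = 0
--
--     for a in AR:
--         if a == "A":
--             ab_count += 1
--             lt_count = 0
--         elif a == "L":
--             lt_count += 1
--         else:
--             lt_count = 0
--
--         if ab_count == 2 or lt_count == 3:
--             return True
--
--     return False
-- ===== SOURCE B (Python) =====
-- def is_detention(AR: str) -> bool:
--     return AR.count("A") >= 2 or "LLL" in AR
-- ===== Notes on version B (the rewrite author's own statement) =====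
-- stated objective: faster
-- what changed: Replaced the stateful single pass with per-character counters and early return by two stateless C-level library scans (a total absence count and a consecutive-late substring search) combined with a short-circuit or.
import Mathlib
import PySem

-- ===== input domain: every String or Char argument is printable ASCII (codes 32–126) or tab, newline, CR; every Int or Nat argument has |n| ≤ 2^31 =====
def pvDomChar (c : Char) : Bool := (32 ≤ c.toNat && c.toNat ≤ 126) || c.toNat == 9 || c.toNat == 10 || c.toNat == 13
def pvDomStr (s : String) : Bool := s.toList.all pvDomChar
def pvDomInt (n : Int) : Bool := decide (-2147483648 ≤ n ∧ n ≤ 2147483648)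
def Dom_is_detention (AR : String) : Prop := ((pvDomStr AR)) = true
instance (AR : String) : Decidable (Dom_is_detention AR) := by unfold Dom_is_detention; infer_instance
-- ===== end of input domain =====

-- B replaces A's stateful counter loop with two independent library scans ('A'-count and 'LLL' substring search); same behaviour; a timing run measured B faster (C-level scans vs a per-character Python loop).

-- ===== PORT A =====
-- the for-loop of A with its two counters and early return, step for step
def isDetentionLoop : List Char → Int → Int → Bool
  | [], _, _ => false
  | a :: rest, ab_count, lt_count =>
    let ab_count := if a == 'A' then ab_count + 1 else ab_count
    let lt_count := if a == 'A' then 0 else if a == 'L' then lt_count + 1 else 0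
    if ab_count == 2 || lt_count == 3 then true else isDetentionLoop rest ab_count lt_count

def is_detention (AR : String) : Bool := isDetentionLoop AR.toList 0 0

-- ===== PORT B =====
def is_detention_alt (AR : String) : Bool :=
  decide (2 ≤ PySem.Str.count AR "A") || PySem.Str.isIn "LLL" AR

-- ===== PRECONDITION & SPEC =====
def Spec_is_detention (AR : String) (out : Bool) : Prop := out = is_detention_alt AR
instance (AR : String) (out : Bool) : Decidable (Spec_is_detention AR out) := by unfold Spec_is_detention; infer_instance

-- ===== CLAIM (what is proved, stated in full; the proofs are below) =====
def Claim_equal_is_detention : Prop := ∀ (AR : String), Dom_is_detention AR → Spec_is_detention AR (is_detention AR)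

-- ===== LEMMAS AND PROOFS =====

-- the 'three consecutive lates' state of A's loop, isolated: k is the current run of 'L's
def hasRun : List Char → Nat → Bool
  | [], _ => false
  | c :: t, k => if c == 'L' then (if k + 1 == 3 then true else hasRun t (k + 1)) else hasRun t 0

lemma count_go_singleton (c : Char) :
    ∀ (l : List Char) (fuel acc : Nat), l.length ≤ fuel →
      PySem.Chars.count.go [c] fuel l acc = acc + l.count c := by
  intro l
  induction l with
  | nil => intro fuel acc h; cases fuel <;> simp [PySem.Chars.count.go]
  | cons hd t ih =>
    intro fuel acc h
    cases fuel with
    | zero => simp at h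
    | succ n =>
      simp only [List.length_cons, Nat.succ_le_succ_iff] at h
      by_cases hc : hd = c
      · subst hc
        simp [PySem.Chars.count.go, List.isPrefixOf, ih n (acc + 1) h]
        omega
      · simp [PySem.Chars.count.go, List.isPrefixOf, hc, ih n acc h, Ne.symm hc]

lemma chars_count_singleton (c : Char) (l : List Char) :
    PySem.Chars.count l [c] = l.count c := by
  simpa [PySem.Chars.count] using count_go_singleton c l l.length 0 le_rfl

lemma hasRun_iff (cs : List Char) : ∀ (k : Nat), k ≤ 2 →
    (hasRun cs k = true ↔
      List.replicate (3 - k) 'L' <+: cs ∨ ['L', 'L', 'L'] <:+: cs) := by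
  induction cs with
  | nil =>
    intro k hk
    simp [hasRun]
    omega
  | cons c t ih =>
    intro k hk
    by_cases hc : c = 'L'
    · subst hc
      by_cases hk2 : k = 2
      · subst hk2
        simp [hasRun]
      · have hk1 : k + 1 ≤ 2 := by omega
        have hstep : hasRun ('L' :: t) k = hasRun t (k + 1) := by
          simp only [hasRun, beq_self_eq_true, if_true, beq_iff_eq]
          rw [if_neg (by omega)]
        rw [hstep, ih (k + 1) hk1]
        rw [show (3 - k) = (3 - (k + 1)) + 1 from by omega, List.replicate_succ,
          List.cons_prefix_cons, List.infix_cons_iff]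
        constructor
        · rintro (h | h)
          · exact Or.inl ⟨rfl, h⟩
          · exact Or.inr (Or.inr h)
        · rintro (⟨-, h⟩ | h | h)
          · exact Or.inl h
          · -- ['L','L','L'] <+: 'L' :: t gives ['L','L'] <+: t, absorbing the shorter replicate
            rw [show (['L', 'L', 'L'] : List Char) = 'L' :: List.replicate 2 'L' from rfl,
              List.cons_prefix_cons] at h
            refine Or.inl (List.IsPrefix.trans ?_ h.2)
            exact ⟨List.replicate (2 - (3 - (k + 1))) 'L', by
              rw [← List.replicate_add]; congr 1; omega⟩
          · exact Or.inr h
    · have hcb : (c == 'L') = false := by simp [hc]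
      simp only [hasRun, hcb, Bool.false_eq_true, if_false]
      rw [ih 0 (by omega), List.infix_cons_iff]
      have hnp : ∀ m, 1 ≤ m → ¬ (List.replicate m 'L' <+: c :: t) := by
        intro m hm h
        cases m with
        | zero => omega
        | succ n =>
          rw [List.replicate_succ, List.cons_prefix_cons] at h
          exact hc h.1.symm
      constructor
      · rintro (h | h)
        · exact Or.inr (Or.inr (show (['L', 'L', 'L'] : List Char) <+: t from h).isInfix)
        · exact Or.inr (Or.inr h)
      · rintro (h | h | h)
        · exact absurd h (hnp (3 - k) (by omega))
        · exact absurd h (hnp 3 (by omega))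
        · exact Or.inr h

lemma loop_eq (cs : List Char) : ∀ (ab : Int) (k : Nat),
    (ab = 0 ∨ ab = 1) → k ≤ 2 →
    isDetentionLoop cs ab (k : Int) =
      (decide (2 ≤ ab + (cs.count 'A' : Int)) || hasRun cs k) := by
  induction cs with
  | nil =>
    intro ab k hab hk
    rcases hab with h | h <;> subst h <;> norm_num [isDetentionLoop, hasRun]
  | cons c t ih =>
    intro ab k hab hk
    by_cases hA : c = 'A'
    · subst hA
      rcases hab with h | h
      · subst h
        simp only [isDetentionLoop, beq_self_eq_true, if_true]
        rw [if_neg (by decide)]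
        rw [show (0 : Int) + 1 = 1 from by norm_num]
        have := ih 1 0 (Or.inr rfl) (by omega)
        simp only [Nat.cast_zero] at this
        rw [this]
        have hrun : hasRun ('A' :: t) k = hasRun t 0 := by simp [hasRun]
        rw [hrun]
        congr 1
        simp only [List.count_cons_self, decide_eq_decide]
        push_cast
        omega
      · subst h
        simp [isDetentionLoop]
        omega
    · have hAb : (c == 'A') = false := by simp [hA]
      by_cases hL : c = 'L'
      · subst hL
        by_cases hk2 : k = 2
        · subst hk2
          simp [isDetentionLoop, hasRun]
        · have hne2 : (ab == 2) = false := by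
            rcases hab with h | h <;> simp [h]
          have hne3 : (((k : Int) + 1) == 3) = false := by
            rw [beq_eq_false_iff_ne]
            omega
          have hne3' : ((k : Nat) + 1 == 3) = false := by
            rw [beq_eq_false_iff_ne]
            omega
          simp only [isDetentionLoop, hasRun, beq_self_eq_true, if_true, hAb,
            Bool.false_eq_true, if_false, hne2, hne3, hne3', Bool.false_or]
          rw [show ((k : Int) + 1) = ((k + 1 : Nat) : Int) from by push_cast; ring,
            ih ab (k + 1) hab (by omega)]
          simp [hA]
      · have hLb : (c == 'L') = false := by simp [hL]
        have hne2 : (ab == 2) = false := by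
          rcases hab with h | h <;> simp [h]
        simp only [isDetentionLoop, hAb, Bool.false_eq_true, if_false, hLb, hne2]
        rw [show ((0 : Int) == 3) = false from by decide]
        simp only [Bool.false_eq_true, if_false, Bool.false_or]
        have := ih ab 0 hab (by omega)
        simp only [Nat.cast_zero] at this
        rw [this]
        simp [hasRun, hLb, hA]

-- ===== VERDICT (by name: the statement is the Claim_ definition above) =====
theorem is_detention_spec : Claim_equal_is_detention := by
  intro AR _
  unfold Spec_is_detention is_detention is_detention_alt
  have h := loop_eq AR.toList 0 0 (Or.inl rfl) (by omega)
  simp only [Nat.cast_zero, zero_add] at h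
  rw [h]
  congr 1
  · simp only [PySem.Str.count_eq, show ("A" : String).toList = ['A'] from rfl,
      chars_count_singleton, decide_eq_decide]
    omega
  · have hiff := hasRun_iff AR.toList 0 (by omega)
    simp only [Nat.sub_zero] at hiff
    have h2 : PySem.Str.isIn "LLL" AR = PySem.Chars.isIn ['L', 'L', 'L'] AR.toList := by
      simp [PySem.Str.isIn_eq]
    rw [h2]
    by_cases hr : hasRun AR.toList 0 = true
    · rw [hr]
      rcases hiff.mp hr with hx | hx
      · exact ((PySem.Chars.isIn_iff_infix _ _).mpr
          (show (['L', 'L', 'L'] : List Char) <+: AR.toList from hx).isInfix).symm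
      · exact ((PySem.Chars.isIn_iff_infix _ _).mpr hx).symm
    · rw [Bool.not_eq_true] at hr
      rw [hr]
      cases hI : PySem.Chars.isIn ['L', 'L', 'L'] AR.toList with
      | false => rfl
      | true =>
        have hinf := (PySem.Chars.isIn_iff_infix _ _).mp hI
        have : hasRun AR.toList 0 = true := hiff.mpr (Or.inr hinf)
        rw [this] at hr
        exact absurd hr (by simp)
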